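-- pv_equiv track=rewrite | github.com/SenneRosaer/COVID19_patterns | main.py | create_chunks2
-- ===== SOURCE A (Python) =====
-- def create_chunks2(date_dna_list, chunk_min=3, chunk_max=8):
--     """
--     Splits a list of strings of DNA in chunks of certain lenghts
--     :param dna_list: list of strings of DNA
--     :param chunk_min: minimum length of chunk
--     :param chunk_max: maximum length of chunk
--     :return: List of lists that contain the chunks
--     """
--     transactions = list()
--     for item in date_dna_list:
--         sequence_transactions = list()
--         for n in range(chunk_min, chunk_max):
--             chunks = []
--             ATG_pos = 0
--             for i in range(0, len(item), n):
--                 if i < len(item) - 2: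
--                     if item[i:i + 3] == "ATG":
--                         ATG_pos = i
--                 chunks.append((item[i:(i + n)], str(i) + "-ATG@" + str(i - ATG_pos - item.count("-", ATG_pos, i))))
--             sequence_transactions += chunks
--         transactions.append(tuple(sequence_transactions))
--     return transactions
-- ===== SOURCE B (Python) =====
-- def create_chunks2(date_dna_list, chunk_min=3, chunk_max=8):
--     """Staged-pass rewrite: per string, a prefix-sum table of '-' counts is
--     built once (each dash count becomes a subtraction); per chunk size the
--     start positions and their ATG anchors are computed as separate lists
--     (a scan), then the chunks are produced by zipping them."""
--     out = []
--     for item in date_dna_list: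
--         dash = [0]
--         t = 0
--         for c in item:
--             t += c == '-'
--             dash.append(t)
--         seq = []
--         for n in range(chunk_min, chunk_max):
--             starts = list(range(0, len(item), n))
--             anchors = []
--             a = 0
--             for i in starts:
--                 if item[i:i + 3] == "ATG":
--                     a = i
--                 anchors.append(a)
--             seq += [(item[i:i + n],
--                      str(i) + "-ATG@" + str(i - a - (dash[i] - dash[a])))
--                     for i, a in zip(starts, anchors)]
--         out.append(tuple(seq))
--     return out
-- ===== Notes on version B (the rewrite author's own statement) =====
-- stated objective: alternative
-- what changed: B replaces A's single stateful loop with staged passes: a prefix-sum table of '-' counts built once per string (each label's dash count becomes a subtraction instead of A's item.count rescan), then per chunk size a start-position list and a scanned anchor list, zipped by a comprehension into the chunks.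
import Mathlib
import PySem

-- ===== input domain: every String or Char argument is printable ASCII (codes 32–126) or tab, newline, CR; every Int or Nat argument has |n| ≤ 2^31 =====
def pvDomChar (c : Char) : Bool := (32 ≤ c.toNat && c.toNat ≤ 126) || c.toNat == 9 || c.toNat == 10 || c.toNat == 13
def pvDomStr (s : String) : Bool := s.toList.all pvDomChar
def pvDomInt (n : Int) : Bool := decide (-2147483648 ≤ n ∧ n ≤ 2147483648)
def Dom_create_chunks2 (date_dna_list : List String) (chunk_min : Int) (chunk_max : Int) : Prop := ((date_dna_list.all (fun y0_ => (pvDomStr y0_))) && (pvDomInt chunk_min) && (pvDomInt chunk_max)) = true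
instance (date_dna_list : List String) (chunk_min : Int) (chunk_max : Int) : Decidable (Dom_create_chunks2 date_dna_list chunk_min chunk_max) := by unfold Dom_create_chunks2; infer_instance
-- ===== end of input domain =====

-- B replaces A's per-chunk item.count('-', ATG_pos, i) rescan by a prefix-sum table of '-'
-- counts built once per string, and A's single stateful loop by staged passes
-- (start positions, scanned anchors, a zip producing the chunks)  (objective: alternative).

-- ===== PORT A =====
-- loop body of A's innermost 'for i in range(0, len(item), n)':
-- ATG_pos update first (the nested ifs = the conjunction), then the append that uses the
-- updated ATG_pos.  item.count("-", ATG_pos, i) with 0 ≤ ATG_pos ≤ i ≤ len(item) is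
-- exactly the count over the slice item[ATG_pos:i] (hand port: PySem.Str.count has no bounds).
def stepA (item : String) (n : Int) (st : Int × List (String × String)) (i : Int) :
    Int × List (String × String) :=
  let atg := if i < PySem.Str.len item - 2 ∧
                PySem.Str.slice item (some i) (some (i + 3)) = "ATG" then i else st.1
  (atg, st.2 ++ [(PySem.Str.slice item (some i) (some (i + n)),
     PySem.Int.toStr i ++ "-ATG@" ++
       PySem.Int.toStr (i - atg -
         (PySem.Str.count (PySem.Str.slice item (some atg) (some i)) "-" : Int)))])

def create_chunks2 (date_dna_list : List String) (chunk_min : Int) (chunk_max : Int) :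
    List (List (String × String)) :=
  date_dna_list.foldl (fun transactions item =>
    transactions ++ [(PySem.List.pyRange chunk_min chunk_max 1).foldl
      (fun seq n =>
        seq ++ ((PySem.List.pyRange 0 (PySem.Str.len item) n).foldl (stepA item n)
          (0, ([] : List (String × String)))).2) []]) []

-- ===== PORT B =====
-- B's prefix-sum table: dash = [0]; for c in item: t += c == '-'; dash.append(t)
-- (a scan, ported as List.scanl).
def dashOf (item : String) : List Int :=
  item.toList.scanl (fun t c => t + (if c = '-' then 1 else 0)) 0

-- B's anchor update: anchors is the scan of this over the start positions.
def updB (item : String) (a : Int) (i : Int) : Int :=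
  if PySem.Str.slice item (some i) (some (i + 3)) = "ATG" then i else a

-- B's zip-comprehension body: one chunk from a (start, anchor) pair
-- (indices always in range, so PySem.List.pyGetD is exact for dash[i]).
def chunkOf (dash : List Int) (item : String) (n : Int) (p : Int × Int) : String × String :=
  (PySem.Str.slice item (some p.1) (some (p.1 + n)),
   PySem.Int.toStr p.1 ++ "-ATG@" ++
     PySem.Int.toStr (p.1 - p.2 -
       (PySem.List.pyGetD dash p.1 0 - PySem.List.pyGetD dash p.2 0)))

def create_chunks2_alt (date_dna_list : List String) (chunk_min : Int) (chunk_max : Int) :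
    List (List (String × String)) :=
  date_dna_list.map (fun item =>
    let dash := dashOf item
    (PySem.List.pyRange chunk_min chunk_max 1).flatMap (fun n =>
      let starts := PySem.List.pyRange 0 (PySem.Str.len item) n
      (starts.zip ((starts.scanl (updB item) 0).drop 1)).map (chunkOf dash item n)))

-- ===== PRECONDITION & SPEC =====
-- Pre_ excludes exactly the inputs on which A raises ValueError: range(0, len(item), 0)
-- with step 0, reached iff some item exists and 0 ∈ range(chunk_min, chunk_max).
def Pre_create_chunks2 (date_dna_list : List String) (chunk_min : Int) (chunk_max : Int) : Prop :=
  date_dna_list = [] ∨ chunk_max ≤ 0 ∨ 1 ≤ chunk_min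
instance (date_dna_list : List String) (chunk_min : Int) (chunk_max : Int) : Decidable (Pre_create_chunks2 date_dna_list chunk_min chunk_max) := by unfold Pre_create_chunks2; infer_instance

def pvWitness_create_chunks2 : List String × Int × Int := (["ATG-ATGCC", "C-ATG"], 3, 8)

def Spec_create_chunks2 (date_dna_list : List String) (chunk_min : Int) (chunk_max : Int) (out : List (List (String × String))) : Prop := out = create_chunks2_alt date_dna_list chunk_min chunk_max
instance (date_dna_list : List String) (chunk_min : Int) (chunk_max : Int) (out : List (List (String × String))) : Decidable (Spec_create_chunks2 date_dna_list chunk_min chunk_max out) := by unfold Spec_create_chunks2; infer_instance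

-- ===== CLAIM (what is proved, stated in full; the proofs are below) =====
def Claim_equal_create_chunks2 : Prop := ∀ (date_dna_list : List String) (chunk_min : Int) (chunk_max : Int), Dom_create_chunks2 date_dna_list chunk_min chunk_max → Pre_create_chunks2 date_dna_list chunk_min chunk_max → Spec_create_chunks2 date_dna_list chunk_min chunk_max (create_chunks2 date_dna_list chunk_min chunk_max)

-- ===== LEMMAS AND PROOFS =====

-- s.count(sub) for a single-character sub is the character count
theorem countgo_single (c : Char) : ∀ (fuel : Nat) (l : List Char) (acc : Nat),
    l.length ≤ fuel → PySem.Chars.count.go [c] fuel l acc = acc + l.count c := by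
  intro fuel
  induction fuel with
  | zero =>
      intro l acc h
      have hl : l = [] := List.eq_nil_of_length_eq_zero (Nat.le_zero.mp h)
      subst hl
      simp [PySem.Chars.count.go]
  | succ f ih =>
      intro l acc h
      cases l with
      | nil => simp [PySem.Chars.count.go]
      | cons x t =>
          simp only [List.length_cons] at h
          have h' : t.length ≤ f := by omega
          simp only [PySem.Chars.count.go]
          by_cases hx : c = x
          · rw [if_pos (by simp [List.isPrefixOf, hx])]
            rw [show List.drop [c].length (x :: t) = t from rfl]
            rw [ih t (acc + 1) h']
            simp [hx]
            omega
          · rw [if_neg (by simp [List.isPrefixOf, hx])]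
            rw [ih t acc h']
            have hx' : ¬ x = c := fun hh => hx hh.symm
            simp [hx']

theorem count_single (l : List Char) (c : Char) :
    PySem.Chars.count l [c] = l.count c := by
  simpa using countgo_single c l.length l 0 le_rfl

-- slicing with 0 ≤ a ≤ len, 0 ≤ b:  xs[a:b] = (drop a).take (min b len - a)
theorem clampIdx_of_nonneg (n : Nat) (i : Int) (h : 0 ≤ i) :
    PySem.List.clampIdx n i = min i.toNat n := by
  simp [PySem.List.clampIdx]
  omega

theorem slice_td {α : Type} (xs : List α) (a b : Int) (h0 : 0 ≤ a) (ha : a ≤ xs.length)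
    (hb : 0 ≤ b) :
    PySem.List.slice xs (some a) (some b) =
      (xs.drop a.toNat).take (min b.toNat xs.length - a.toNat) := by
  simp only [PySem.List.slice, clampIdx_of_nonneg _ _ h0, clampIdx_of_nonneg _ _ hb]
  rw [show min a.toNat xs.length = a.toNat by omega]

-- B's scan computes the '-' counts of all prefixes
theorem scanl_count : ∀ (l : List Char) (t : Int),
    l.scanl (fun t c => t + (if c = '-' then 1 else 0)) t
      = (List.range (l.length + 1)).map (fun j => t + ((l.take j).count '-' : Int)) := by
  intro l
  induction l with
  | nil => intro t; simp
  | cons x l ih =>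
      intro t
      rw [List.scanl_cons, ih]
      have hr : List.range (l.length + 1 + 1) = 0 :: (List.range (l.length + 1)).map Nat.succ :=
        List.range_succ_eq_map
      rw [List.length_cons, hr, List.map_cons, List.map_map]
      refine List.cons_eq_cons.mpr ⟨by simp, List.map_congr_left ?_⟩
      intro j hj
      simp only [Function.comp_apply, List.take_succ_cons, List.count_cons]
      by_cases hx : x = '-'
      · simp [hx]; ring
      · simp [hx]

theorem dashOf_eq (item : String) :
    dashOf item = (List.range (item.toList.length + 1)).map
      (fun j => ((item.toList.take j).count '-' : Int)) := by
  unfold dashOf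
  rw [scanl_count]
  simp

theorem dash_getD (item : String) (i : Int) (h0 : 0 ≤ i) (hi : i ≤ (item.toList.length : Int)) :
    PySem.List.pyGetD (dashOf item) i 0 = ((item.toList.take i.toNat).count '-' : Int) := by
  rw [PySem.List.pyGetD_of_nonneg _ _ h0, dashOf_eq]
  rw [PySem.List.getD_map_range _ _ _ _ (by omega)]

-- if item[i:i+3] == "ATG" then i < len(item) - 2 (A's guard is redundant)
theorem guard_redundant (item : String) (i : Int) (h0 : 0 ≤ i) (hi : i < (item.toList.length : Int))
    (h : PySem.Str.slice item (some i) (some (i + 3)) = "ATG") :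
    i < (item.toList.length : Int) - 2 := by
  have hl := congrArg String.toList h
  rw [PySem.Str.toList_slice, PySem.Chars.slice_eq_listSlice,
      slice_td _ _ _ h0 (by omega) (by omega),
      show ("ATG" : String).toList = ['A', 'T', 'G'] from rfl] at hl
  have hlen := congrArg List.length hl
  simp only [List.length_take, List.length_drop, List.length_cons, List.length_nil] at hlen
  omega

-- the bounded count A uses equals the prefix-sum difference B uses
theorem count_slice (item : String) (a i : Int) (h0 : 0 ≤ a) (hai : a ≤ i)
    (hi : i ≤ (item.toList.length : Int)) :
    ((PySem.Str.count (PySem.Str.slice item (some a) (some i)) "-" : Nat) : Int)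
      = ((item.toList.take i.toNat).count '-' : Int)
        - ((item.toList.take a.toNat).count '-' : Int) := by
  have hcs : (PySem.Str.slice item (some a) (some i)).toList
      = (item.toList.drop a.toNat).take (i.toNat - a.toNat) := by
    rw [PySem.Str.toList_slice, PySem.Chars.slice_eq_listSlice,
        slice_td _ _ _ h0 (by omega) (by omega)]
    congr 1
    omega
  rw [PySem.Str.count_eq, hcs, show ("-" : String).toList = ['-'] from rfl, count_single]
  have hsplit : item.toList.take i.toNat
      = item.toList.take a.toNat ++ (item.toList.drop a.toNat).take (i.toNat - a.toNat) := by
    rw [← List.take_add]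
    congr 1
    omega
  rw [hsplit, List.count_append]
  push_cast
  ring

-- A's stateful fold equals B's zip of the starts with the scanned anchors
theorem foldA_eq_zip (item : String) (n : Int) :
    ∀ (is : List Int), (∀ j ∈ is, 0 ≤ j ∧ j < (item.toList.length : Int)) →
      is.Pairwise (· ≤ ·) →
      ∀ (a : Int) (st : List (String × String)), 0 ≤ a → (∀ j ∈ is, a ≤ j) →
      (is.foldl (stepA item n) (a, st)).2
        = st ++ (is.zip ((is.scanl (updB item) a).drop 1)).map (chunkOf (dashOf item) item n) := by
  intro is
  induction is with
  | nil => intro _ _ a st _ _; simp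
  | cons i t ih =>
      intro hb hp a st ha hle
      obtain ⟨hrel, hp'⟩ := List.pairwise_cons.mp hp
      have hib := hb i List.mem_cons_self
      have hai := hle i List.mem_cons_self
      have hupd : (if i < PySem.Str.len item - 2 ∧
          PySem.Str.slice item (some i) (some (i + 3)) = "ATG" then i else a) = updB item a i := by
        unfold updB
        by_cases hs : PySem.Str.slice item (some i) (some (i + 3)) = "ATG"
        · have hg : i < PySem.Str.len item - 2 := by
            rw [PySem.Str.len_eq]
            exact guard_redundant item i hib.1 hib.2 hs
          rw [if_pos (And.intro hg hs), if_pos hs]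
        · rw [if_neg (fun hc => hs hc.2), if_neg hs]
      have ha' : 0 ≤ updB item a i := by
        unfold updB; split_ifs
        · exact hib.1
        · exact ha
      have hai' : updB item a i ≤ i := by
        unfold updB; split_ifs
        · exact le_rfl
        · exact hai
      have hchunk : (PySem.Str.slice item (some i) (some (i + n)),
          PySem.Int.toStr i ++ "-ATG@" ++
            PySem.Int.toStr (i - updB item a i -
              (PySem.Str.count (PySem.Str.slice item (some (updB item a i)) (some i)) "-" : Int)))
          = chunkOf (dashOf item) item n (i, updB item a i) := by
        unfold chunkOf
        rw [count_slice item (updB item a i) i ha' hai' (le_of_lt hib.2),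
            dash_getD item i hib.1 (le_of_lt hib.2),
            dash_getD item (updB item a i) ha' (by omega)]
      have hIH := ih (fun j hj => hb j (List.mem_cons_of_mem _ hj)) hp'
        (updB item a i)
        (st ++ [chunkOf (dashOf item) item n (i, updB item a i)]) ha'
        (by
          intro j hj
          unfold updB; split_ifs
          · exact hrel j hj
          · exact hle j (List.mem_cons_of_mem _ hj))
      have hstep : stepA item n (a, st) i
          = (updB item a i, st ++ [chunkOf (dashOf item) item n (i, updB item a i)]) := by
        simp only [stepA]
        rw [hupd, hchunk]
      rw [List.foldl_cons, hstep, hIH]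
      rw [List.scanl_cons]
      cases t with
      | nil => simp
      | cons x xs =>
          simp [List.append_assoc]

-- the ported range(0, L, n) is empty for a negative step when 0 ≤ L
theorem pyRange_neg_empty (b s : Int) (hs : s < 0) (hb : 0 ≤ b) :
    PySem.List.pyRange 0 b s = [] := by
  have h0 : s ≠ 0 := by omega
  have h1 : ¬ (0 : Int) < s := by omega
  have h2 : ¬ b < 0 := by omega
  simp [PySem.List.pyRange, h0, h1, h2]

theorem pyRange_pos_pairwise (b s : Int) (hs : 0 < s) :
    (PySem.List.pyRange 0 b s).Pairwise (· ≤ ·) := by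
  rw [PySem.List.pyRange_of_pos _ _ hs, List.pairwise_map]
  refine List.Pairwise.imp ?_ List.pairwise_lt_range
  intro m k hmk
  have hmk' : (m : Int) ≤ k := by exact_mod_cast hmk.le
  have := mul_le_mul_of_nonneg_left hmk' (le_of_lt hs)
  omega

-- per-item equality of the produced chunk list, for step values A does not crash on
theorem seq_eq (item : String) (cmin cmax : Int)
    (hns : ∀ n ∈ PySem.List.pyRange cmin cmax 1, n < 0 ∨ 1 ≤ n) :
    (PySem.List.pyRange cmin cmax 1).foldl
      (fun seq n =>
        seq ++ ((PySem.List.pyRange 0 (PySem.Str.len item) n).foldl (stepA item n)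
          (0, ([] : List (String × String)))).2) []
    = (PySem.List.pyRange cmin cmax 1).flatMap (fun n =>
        let starts := PySem.List.pyRange 0 (PySem.Str.len item) n
        (starts.zip ((starts.scanl (updB item) 0).drop 1)).map (chunkOf (dashOf item) item n)) := by
  rw [PySem.List.foldl_append_eq_flatMap]
  rw [List.nil_append]
  apply List.flatMap_congr
  intro n hn
  rcases hns n hn with hneg | hpos
  · rw [PySem.Str.len_eq, pyRange_neg_empty _ _ hneg (by omega)]
    simp
  · have hbounds : ∀ j ∈ PySem.List.pyRange 0 (PySem.Str.len item) n,
        0 ≤ j ∧ j < (item.toList.length : Int) := by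
      intro j hj
      rw [PySem.Str.len_eq] at hj
      have h := (PySem.List.mem_pyRange_iff_of_pos (by omega) j).mp hj
      exact ⟨h.1, h.2.1⟩
    have hpair : (PySem.List.pyRange 0 (PySem.Str.len item) n).Pairwise (· ≤ ·) :=
      pyRange_pos_pairwise _ _ (by omega)
    have hge : ∀ j ∈ PySem.List.pyRange 0 (PySem.Str.len item) n, (0 : Int) ≤ j :=
      fun j hj => (hbounds j hj).1
    simpa using foldA_eq_zip item n _ hbounds hpair 0 [] le_rfl hge

-- ===== VERDICT (by name: the statement is the Claim_ definition above) =====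
theorem create_chunks2_spec : Claim_equal_create_chunks2 := by
  intro l cmin cmax hdom hpre
  unfold Spec_create_chunks2
  rcases hpre with hnil | hpre
  · subst hnil; rfl
  · have hns : ∀ n ∈ PySem.List.pyRange cmin cmax 1, n < 0 ∨ 1 ≤ n := by
      intro n hn
      rw [PySem.List.mem_pyRange_one] at hn
      omega
    unfold create_chunks2 create_chunks2_alt
    rw [PySem.List.foldl_append_singleton_eq_map, List.nil_append]
    apply List.map_congr_left
    intro item _
    exact seq_eq item cmin cmax hns
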